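-- pv_equiv track=rewrite | github.com/mdmake/yp_algorithm | sprint_3/task_I.py | countingSortID
-- ===== SOURCE A (Python) =====
-- def countingSortID(array):
--     counted_values = [0] * (max(array) + 1)
--     for value in array:
--         counted_values[value] += 1
--
--     edList = []
--
--     for i in range(len(counted_values)):
--         if counted_values[i] != 0:
--             edList.append((counted_values[i], i))
--
--     return edList
-- ===== SOURCE B (Python) =====
-- def countingSortID(array):
--     result = []
--     prev = None
--     count = 0
--     for v in sorted(array):
--         if v == prev:
--             count += 1
--         else:
--             if prev is not None:
--                 result.append((count, prev))
--             prev = v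
--             count = 1
--     if prev is not None:
--         result.append((count, prev))
--     return result
-- ===== Notes on version B (the rewrite author's own statement) =====
-- stated objective: alternative
-- what changed: Replaces the counting array indexed by value (max(array)+1 slots plus a scan over the whole index range) with a single sort followed by one left-to-right pass grouping runs of equal values into (run-length, value) pairs.
-- outside the precondition, e.g. on countingSortID([-1, 1]): A returns [(2, 1)], B returns [(1, -1), (1, 1)]; on countingSortID([-2, 1]): A returns [(1, 0), (1, 1)], B returns [(1, -2), (1, 1)]
import Mathlib
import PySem

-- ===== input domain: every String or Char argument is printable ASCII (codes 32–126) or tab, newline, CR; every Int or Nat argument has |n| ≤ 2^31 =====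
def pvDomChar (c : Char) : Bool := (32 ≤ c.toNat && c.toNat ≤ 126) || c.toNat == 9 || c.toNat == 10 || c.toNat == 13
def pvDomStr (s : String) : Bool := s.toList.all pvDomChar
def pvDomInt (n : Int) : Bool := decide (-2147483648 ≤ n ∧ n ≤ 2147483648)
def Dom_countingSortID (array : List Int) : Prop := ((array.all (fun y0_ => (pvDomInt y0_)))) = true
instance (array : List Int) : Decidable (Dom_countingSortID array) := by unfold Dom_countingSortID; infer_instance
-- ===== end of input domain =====

-- B replaces A's value-indexed counting array with sort-once + one grouping pass (alternative algorithm).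

-- ===== PORT A =====
def countingSortID (array : List Int) : List (Int × Int) :=
  -- max(array): raises ValueError on []; excluded by Pre_
  let m := (PySem.List.max? array (fun x => x)).getD 0
  let cv := array.foldl
    (fun cv value => PySem.List.pySetD cv value (PySem.List.pyGetD cv value 0 + 1))
    (List.replicate (m + 1).toNat 0)
  -- 'for i in range(len(cv)): if cv[i] != 0: edList.append((cv[i], i))' — the index loop reading
  -- cv[i] is ported exactly as a fold over cv carrying the running index i
  (cv.foldl (fun ed c => (if c ≠ 0 then ed.1 ++ [(c, ed.2)] else ed.1, ed.2 + 1)) ([], 0)).1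

-- ===== PORT B =====
def countingSortID_alt (array : List Int) : List (Int × Int) :=
  let st := (PySem.List.sorted array (fun x => x) false).foldl
    (fun (acc : List (Int × Int) × Option Int × Int) v =>
      if acc.2.1 = some v then (acc.1, acc.2.1, acc.2.2 + 1)
      else
        match acc.2.1 with
        | some p => (acc.1 ++ [(acc.2.2, p)], some v, 1)
        | none => (acc.1, some v, 1))
    ([], none, 0)
  match st with
  | (res, some p, count) => res ++ [(count, p)]
  | (res, none, _) => res

-- ===== PRECONDITION & SPEC =====
-- Pre_ excludes the empty list (A raises ValueError via max()) and lists with a negative element: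
-- on those A either raises IndexError (element below -(max+1)) or returns accidental
-- negative-index-wraparound miscounts that are an artefact of A's implementation.
def Pre_countingSortID (array : List Int) : Prop :=
  array ≠ [] ∧ ∀ x ∈ array, 0 ≤ x
instance (array : List Int) : Decidable (Pre_countingSortID array) := by
  unfold Pre_countingSortID; infer_instance
def pvWitness_countingSortID : List Int := [2, 0, 2]

def Spec_countingSortID (array : List Int) (out : List (Int × Int)) : Prop :=
  out = countingSortID_alt array
instance (array : List Int) (out : List (Int × Int)) : Decidable (Spec_countingSortID array out) := by
  unfold Spec_countingSortID; infer_instance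

-- ===== CLAIM (what is proved, stated in full; the proofs are below) =====
def Claim_equal_countingSortID : Prop := ∀ (array : List Int), Dom_countingSortID array → Pre_countingSortID array → Spec_countingSortID array (countingSortID array)

-- ===== LEMMAS AND PROOFS =====

-- run-grouping reference function (proof helper for B)
def groupRuns : List Int → List (Int × Int)
  | [] => []
  | v :: t =>
    ((1 + ((t.takeWhile (· == v)).length : Int), v)) :: groupRuns (t.dropWhile (· == v))
termination_by s => s.length
decreasing_by
  simpa [Nat.lt_succ_iff] using List.length_dropWhile_le (· == v) t

def bStep (acc : List (Int × Int) × Option Int × Int) (v : Int) : List (Int × Int) × Option Int × Int :=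
  if acc.2.1 = some v then (acc.1, acc.2.1, acc.2.2 + 1)
  else
    match acc.2.1 with
    | some p => (acc.1 ++ [(acc.2.2, p)], some v, 1)
    | none => (acc.1, some v, 1)

def bFinish (st : List (Int × Int) × Option Int × Int) : List (Int × Int) :=
  match st with
  | (res, some p, count) => res ++ [(count, p)]
  | (res, none, _) => res

theorem bFold (s : List Int) : ∀ (res : List (Int × Int)) (p c : Int),
    bFinish (s.foldl bStep (res, some p, c)) =
      res ++ ((c + ((s.takeWhile (· == p)).length : Int), p) :: groupRuns (s.dropWhile (· == p))) := by
  induction s with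
  | nil => intro res p c; simp [bFinish, groupRuns]
  | cons v t ih =>
    intro res p c
    by_cases h : p = v
    · subst h
      rw [List.foldl_cons, show bStep (res, some p, c) p = (res, some p, c + 1) from by simp [bStep]]
      rw [ih res p (c + 1)]
      simp only [List.takeWhile_cons, List.dropWhile_cons, beq_self_eq_true, if_pos,
        List.length_cons]
      push_cast; ring_nf
    · rw [List.foldl_cons, show bStep (res, some p, c) v = (res ++ [(c, p)], some v, 1) from by simp [bStep, h]]
      rw [ih (res ++ [(c, p)]) v 1]
      have hv : (v == p) = false := by simp [Ne.symm h]
      simp only [List.takeWhile_cons, List.dropWhile_cons, hv, Bool.false_eq_true, if_false, List.length_nil]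
      rw [show groupRuns (v :: t) = (1 + ((t.takeWhile (· == v)).length : Int), v) :: groupRuns (t.dropWhile (· == v)) from by rw [groupRuns]]
      simp

theorem alt_eq_groupRuns (array : List Int) :
    countingSortID_alt array = groupRuns (PySem.List.sorted array (fun x => x) false) := by
  have hrfl : countingSortID_alt array
      = bFinish (List.foldl bStep ([], none, 0) (PySem.List.sorted array (fun x => x) false)) := rfl
  rw [hrfl]
  cases hs : PySem.List.sorted array (fun x => x) false with
  | nil => simp [bFinish, groupRuns]
  | cons v t =>
    rw [List.foldl_cons, show bStep ([], none, 0) v = ([], some v, 1) from by simp [bStep]]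
    rw [bFold]
    rw [show groupRuns (v :: t) = (1 + ((t.takeWhile (· == v)).length : Int), v) :: groupRuns (t.dropWhile (· == v)) from by rw [groupRuns]]
    simp

theorem run_facts (v : Int) (t : List Int) (ht : (v :: t).Pairwise (· ≤ ·)) :
    (∀ x ∈ t.dropWhile (· == v), v < x) ∧
    ((v :: t).count v = 1 + (t.takeWhile (· == v)).length) ∧
    (∀ x : Int, v < x → (v :: t).count x = (t.dropWhile (· == v)).count x) ∧
    (t.dropWhile (· == v)).Pairwise (· ≤ ·) := by
  have hle : ∀ x ∈ t, v ≤ x := (List.pairwise_cons.mp ht).1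
  have htp : t.Pairwise (· ≤ ·) := (List.pairwise_cons.mp ht).2
  have hdwsub : ∀ x ∈ t.dropWhile (· == v), x ∈ t :=
    fun x hx => (List.dropWhile_sublist (· == v)).mem hx
  have hdwp : (t.dropWhile (· == v)).Pairwise (· ≤ ·) :=
    List.Pairwise.sublist (List.dropWhile_sublist (· == v)) htp
  have hgt : ∀ x ∈ t.dropWhile (· == v), v < x := by
    cases hdw : t.dropWhile (· == v) with
    | nil => simp
    | cons h r =>
      have hh : (h == v) = false := by
        have := List.head_dropWhile_not (· == v) (l := t) (by simp [hdw])
        simpa [hdw] using this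
      have hvh : v < h := by
        have := hle h (hdwsub h (by simp [hdw]))
        rcases lt_or_eq_of_le this with h' | h'
        · exact h'
        · simp [← h'] at hh
      intro x hx
      try rw [hdw] at hx
      have hdwp' := hdwp
      rw [hdw] at hdwp'
      rcases List.mem_cons.mp hx with rfl | hx'
      · exact hvh
      · exact lt_of_lt_of_le hvh ((List.pairwise_cons.mp hdwp').1 x hx')
  refine ⟨hgt, ?_, ?_, hdwp⟩
  · have htw : (t.takeWhile (· == v)).count v = (t.takeWhile (· == v)).length :=
      List.count_eq_length.mpr (fun b hb => by
        have h2 := List.mem_takeWhile_imp (p := (· == v)) hb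
        exact (beq_iff_eq.mp h2).symm)
    have hdw0 : (t.dropWhile (· == v)).count v = 0 :=
      List.count_eq_zero.mpr (fun hv => lt_irrefl v (hgt v hv))
    have hsplit : t.count v = (t.takeWhile (· == v)).count v + (t.dropWhile (· == v)).count v := by
      conv_lhs => rw [← List.takeWhile_append_dropWhile (p := (· == v)) (l := t)]
      exact List.count_append ..
    simp [hsplit, htw, hdw0, Nat.add_comm]
  · intro x hx
    have hxv : v ≠ x := ne_of_lt hx
    have htw0 : (t.takeWhile (· == v)).count x = 0 :=
      List.count_eq_zero.mpr (fun hmem => by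
        have h2 := List.mem_takeWhile_imp (p := (· == v)) hmem
        exact hxv (beq_iff_eq.mp h2).symm)
    have hsplit : t.count x = (t.takeWhile (· == v)).count x + (t.dropWhile (· == v)).count x := by
      conv_lhs => rw [← List.takeWhile_append_dropWhile (p := (· == v)) (l := t)]
      exact List.count_append ..
    simp [hsplit, htw0, hxv]

theorem groupRuns_mem (s : List Int) : s.Pairwise (· ≤ ·) → ∀ p : Int × Int,
    (p ∈ groupRuns s ↔ p.2 ∈ s ∧ p.1 = (s.count p.2 : Int)) := by
  induction s using groupRuns.induct with
  | case1 => intro _ p; simp [groupRuns]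
  | case2 v t ih =>
    intro hs p
    obtain ⟨hgt, hcv, hcgt, hdwp⟩ := run_facts v t hs
    rw [show groupRuns (v :: t) = (1 + ((t.takeWhile (· == v)).length : Int), v) :: groupRuns (t.dropWhile (· == v)) from by rw [groupRuns]]
    rw [List.mem_cons, ih hdwp p]
    constructor
    · rintro (rfl | ⟨hmem, hcnt⟩)
      · refine ⟨List.mem_cons_self, ?_⟩
        simp only [hcv]; push_cast; ring
      · have hlt := hgt _ hmem
        refine ⟨List.mem_cons_of_mem _ ((List.dropWhile_sublist (· == v)).mem hmem), ?_⟩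
        rw [hcgt _ hlt]; exact hcnt
    · rintro ⟨hmem, hcnt⟩
      by_cases hpv : p.2 = v
      · left
        have : p.1 = 1 + ((t.takeWhile (· == v)).length : Int) := by
          rw [hcnt, hpv, hcv]; push_cast; ring
        cases p; simp_all
      · right
        have hpt : p.2 ∈ t := by
          rcases List.mem_cons.mp hmem with h' | h'
          · exact absurd h' hpv
          · exact h'
        have hpd : p.2 ∈ t.dropWhile (· == v) := by
          have : p.2 ∈ t.takeWhile (· == v) ++ t.dropWhile (· == v) := by
            rw [List.takeWhile_append_dropWhile]; exact hpt
          rcases List.mem_append.mp this with h' | h'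
          · have h2 := List.mem_takeWhile_imp (p := (· == v)) h'
            exact absurd (beq_iff_eq.mp h2) hpv
          · exact h'
        exact ⟨hpd, by rw [hcnt, hcgt _ (hgt _ hpd)]⟩

theorem groupRuns_pairwise (s : List Int) : s.Pairwise (· ≤ ·) →
    (groupRuns s).Pairwise (fun a b => a.2 < b.2) := by
  induction s using groupRuns.induct with
  | case1 => intro _; simp [groupRuns]
  | case2 v t ih =>
    intro hs
    obtain ⟨hgt, _, _, hdwp⟩ := run_facts v t hs
    rw [show groupRuns (v :: t) = (1 + ((t.takeWhile (· == v)).length : Int), v) :: groupRuns (t.dropWhile (· == v)) from by rw [groupRuns]]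
    refine List.pairwise_cons.mpr ⟨?_, ih hdwp⟩
    intro q hq
    have := (groupRuns_mem _ hdwp q).mp hq
    exact hgt _ this.1

-- A's counting loop computes counts (nonnegative in-range values)
theorem cv_spec (arr : List Int) : ∀ (cv : List Int),
    (∀ x ∈ arr, 0 ≤ x ∧ x < (cv.length : Int)) →
    (arr.foldl (fun cv value => PySem.List.pySetD cv value (PySem.List.pyGetD cv value 0 + 1)) cv).length = cv.length ∧
    ∀ k : Nat, (arr.foldl (fun cv value => PySem.List.pySetD cv value (PySem.List.pyGetD cv value 0 + 1)) cv).getD k 0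
      = cv.getD k 0 + arr.count (k : Int) := by
  induction arr with
  | nil => intro cv _; simp
  | cons value rest ih =>
    intro cv hb
    obtain ⟨hv0, hvlt⟩ := hb value List.mem_cons_self
    have hstep : PySem.List.pySetD cv value (PySem.List.pyGetD cv value 0 + 1)
        = cv.set value.toNat (cv.getD value.toNat 0 + 1) := by
      rw [PySem.List.pySetD_of_nonneg _ _ hv0, PySem.List.pyGetD_of_nonneg _ _ hv0]
    have hlen' : (cv.set value.toNat (cv.getD value.toNat 0 + 1)).length = cv.length := by simp
    have hb' : ∀ x ∈ rest, 0 ≤ x ∧ x < ((cv.set value.toNat (cv.getD value.toNat 0 + 1)).length : Int) := by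
      intro x hx; rw [hlen']; exact hb x (List.mem_cons_of_mem _ hx)
    obtain ⟨ihl, ihg⟩ := ih _ hb'
    simp only [List.foldl_cons]
    rw [hstep]
    refine ⟨by rw [ihl, hlen'], ?_⟩
    intro k
    rw [ihg k]
    have hset : (cv.set value.toNat (cv.getD value.toNat 0 + 1)).getD k 0
        = if value.toNat = k ∧ k < cv.length then cv.getD k 0 + 1 else cv.getD k 0 := by
      rw [List.getD_eq_getElem?_getD, List.getD_eq_getElem?_getD, List.getElem?_set]
      split_ifs with h1 h2 <;> simp_all
    rw [hset]
    by_cases hk : value = (k : Int)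
    · have h1 : value.toNat = k := by omega
      have h2 : k < cv.length := by omega
      rw [if_pos ⟨h1, h2⟩, List.count_cons, if_pos (by simpa using hk)]
      push_cast; ring
    · have h1 : ¬ (value.toNat = k ∧ k < cv.length) := by
        rintro ⟨rfl, _⟩; omega
      rw [if_neg h1, List.count_cons, if_neg (by simpa using hk)]
      push_cast; ring

theorem loop2_eq (l : List Int) : ∀ (acc : List (Int × Int)) (i : Int),
    (l.foldl (fun ed c => (if c ≠ 0 then ed.1 ++ [(c, ed.2)] else ed.1, ed.2 + 1)) (acc, i)).1
      = acc ++ ((PySem.List.enumerate l i).filter (fun iv => decide (iv.2 ≠ 0))).map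
          (fun iv => (iv.2, iv.1)) := by
  induction l with
  | nil => intro acc i; simp [PySem.List.enumerate]
  | cons c t ih =>
    intro acc i
    rw [List.foldl_cons]
    by_cases hc : c = 0
    · rw [show ((if c ≠ 0 then (acc, i).1 ++ [(c, (acc, i).2)] else (acc, i).1, (acc, i).2 + 1)
            : List (Int × Int) × Int) = (acc, i + 1) from by simp [hc]]
      rw [ih acc (i + 1)]
      simp [PySem.List.enumerate, hc]
    · rw [show ((if c ≠ 0 then (acc, i).1 ++ [(c, (acc, i).2)] else (acc, i).1, (acc, i).2 + 1)
            : List (Int × Int) × Int) = (acc ++ [(c, i)], i + 1) from by simp [hc]]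
      rw [ih (acc ++ [(c, i)]) (i + 1)]
      simp [PySem.List.enumerate, hc]

theorem A_mem (array : List Int) (h : Pre_countingSortID array)
    (p : Int × Int) :
    p ∈ countingSortID array ↔ p.2 ∈ array ∧ p.1 = (array.count p.2 : Int) := by
  obtain ⟨hne, hpos⟩ := h
  obtain ⟨mx, hmx⟩ : ∃ mx, PySem.List.max? array (fun x => x) = some mx := by
    cases hm : PySem.List.max? array (fun x => x) with
    | none => exact absurd ((PySem.List.max?_eq_none_iff _ _).mp hm) hne
    | some m => exact ⟨m, rfl⟩
  have hmax : ∀ y ∈ array, y ≤ mx := PySem.List.max?_isMax hmx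
  have hmx0 : 0 ≤ mx := hpos mx (PySem.List.max?_mem hmx)
  have hb : ∀ x ∈ array, 0 ≤ x ∧ x < ((List.replicate (mx + 1).toNat (0 : Int)).length : Int) := by
    intro x hx
    refine ⟨hpos x hx, ?_⟩
    have := hmax x hx
    simp only [List.length_replicate]
    omega
  obtain ⟨hlen, hget⟩ := cv_spec array _ hb
  simp only [countingSortID, hmx, Option.getD_some]
  rw [loop2_eq]
  have hcv : ∀ k : Nat, (array.foldl (fun cv value => PySem.List.pySetD cv value (PySem.List.pyGetD cv value 0 + 1)) (List.replicate (mx + 1).toNat 0)).getD k 0 = (array.count (k : Int) : Int) := by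
    intro k
    rw [hget k]
    simp
  simp only [List.nil_append, List.mem_map, List.mem_filter, decide_eq_true_eq,
    PySem.List.mem_enumerate_iff]
  constructor
  · rintro ⟨iv, ⟨⟨k, hk, rfl⟩, hnz⟩, rfl⟩
    simp only [zero_add] at hnz ⊢
    rw [← List.getD_eq_getElem _ 0 hk, hcv k] at hnz ⊢
    refine ⟨?_, rfl⟩
    have hc : array.count (k : Int) ≠ 0 := by exact_mod_cast hnz
    exact List.count_pos_iff.mp (Nat.pos_of_ne_zero hc)
  · rintro ⟨hmem, hcnt⟩
    have h0 : 0 ≤ p.2 := hpos _ hmem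
    have hcp : 0 < array.count p.2 := List.count_pos_iff.mpr hmem
    refine ⟨(p.2, p.1), ⟨⟨p.2.toNat, ?_, ?_⟩, ?_⟩, by simp⟩
    · rw [hlen]
      simp only [List.length_replicate]
      have := hmax _ hmem
      omega
    · rw [← List.getD_eq_getElem _ 0, hcv p.2.toNat, Int.toNat_of_nonneg h0, ← hcnt]
      simp
    · show p.1 ≠ 0
      rw [hcnt]
      exact_mod_cast hcp.ne'

theorem A_pairwise (array : List Int) :
    (countingSortID array).Pairwise (fun a b => a.2 < b.2) := by
  simp only [countingSortID]
  rw [loop2_eq]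
  simp only [List.nil_append]
  rw [List.pairwise_map]
  exact List.Pairwise.filter _ (PySem.List.pairwise_lt_enumerate _ 0)

theorem sorted_id_pairwise (array : List Int) :
    (PySem.List.sorted array (fun x => x) false).Pairwise (· ≤ ·) := by
  simpa using PySem.List.sorted_pairwise array (fun x => x)

theorem B_mem (array : List Int) (p : Int × Int) :
    p ∈ countingSortID_alt array ↔ p.2 ∈ array ∧ p.1 = (array.count p.2 : Int) := by
  rw [alt_eq_groupRuns, groupRuns_mem _ (sorted_id_pairwise array) p]
  have hperm := PySem.List.sorted_perm array (fun x => x) false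
  rw [hperm.mem_iff, hperm.count_eq]

theorem B_pairwise (array : List Int) :
    (countingSortID_alt array).Pairwise (fun a b => a.2 < b.2) := by
  rw [alt_eq_groupRuns]
  exact groupRuns_pairwise _ (sorted_id_pairwise array)

-- ===== VERDICT (by name: the statement is the Claim_ definition above) =====
theorem countingSortID_spec : Claim_equal_countingSortID := by
  intro array _ hpre
  have hA := A_pairwise array
  have hB := B_pairwise array
  have hmem : ∀ p, p ∈ countingSortID array ↔ p ∈ countingSortID_alt array := fun p => by
    rw [A_mem array hpre p, B_mem array p]
  have hndA : (countingSortID array).Nodup :=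
    hA.imp (fun {a b} hab => fun e => absurd hab (by rw [e]; exact lt_irrefl _))
  have hndB : (countingSortID_alt array).Nodup :=
    hB.imp (fun {a b} hab => fun e => absurd hab (by rw [e]; exact lt_irrefl _))
  have hperm : (countingSortID array).Perm (countingSortID_alt array) :=
    (List.perm_ext_iff_of_nodup hndA hndB).mpr hmem
  exact List.Perm.eq_of_pairwise
    (fun a b _ _ h1 h2 => absurd (lt_trans h1 h2) (lt_irrefl _)) hA hB hperm
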